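-- pv_equiv track=rewrite | github.com/zackey2414/courses | assets/fix_syntax.py | _template_content_to_dquote
-- ===== SOURCE A (Python) =====
-- def _template_content_to_dquote(inner):
--     """Convert template literal content to double-quoted string content.
--
--     - \\` → ` (un-escape backticks — not special in double-quoted strings)
--     - " → \\" (escape double quotes)
--     - actual newlines → \\n
--     - preserve other escapes (\\n, \\t, \\\\, etc.)
--     """
--     result = []
--     i = 0
--     n = len(inner)
--     while i < n:
--         c = inner[i]
--         if c == '\\' and i + 1 < n:
--             next_c = inner[i + 1]
--             if next_c == '`':
--                 # \` → just ` (un-escape)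
--                 result.append('`')
--                 i += 2
--             else:
--                 # Keep other escapes as-is
--                 result.append(c)
--                 result.append(next_c)
--                 i += 2
--         elif c == '"':
--             result.append('\\"')
--             i += 1
--         elif c == '\n':
--             result.append('\\n')
--             i += 1
--         else:
--             result.append(c)
--             i += 1
--     return ''.join(result)
-- ===== SOURCE B (Python) =====
-- def _template_content_to_dquote(inner):
--     def plain(s):
--         return ''.join('\\"' if c == '"' else '\\n' if c == '\n' else c for c in s)
--     segs = inner.split('\\')
--     out = [plain(segs[0])]
--     i = 1
--     while i < len(segs):
--         s = segs[i]
--         if s: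
--             out.append('`' if s[0] == '`' else '\\' + s[0])
--             out.append(plain(s[1:]))
--             i += 1
--         elif i + 1 < len(segs):
--             out.append('\\\\')
--             out.append(plain(segs[i + 1]))
--             i += 2
--         else:
--             out.append('\\')
--             i += 1
--     return ''.join(out)
-- ===== Notes on version B (the rewrite author's own statement) =====
-- stated objective: alternative
-- what changed: Replaced the index-driven while-loop scanner with a single split on backslash, a per-character map of each segment, and a rejoin that handles each escape at the segment boundary.
import Mathlib
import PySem

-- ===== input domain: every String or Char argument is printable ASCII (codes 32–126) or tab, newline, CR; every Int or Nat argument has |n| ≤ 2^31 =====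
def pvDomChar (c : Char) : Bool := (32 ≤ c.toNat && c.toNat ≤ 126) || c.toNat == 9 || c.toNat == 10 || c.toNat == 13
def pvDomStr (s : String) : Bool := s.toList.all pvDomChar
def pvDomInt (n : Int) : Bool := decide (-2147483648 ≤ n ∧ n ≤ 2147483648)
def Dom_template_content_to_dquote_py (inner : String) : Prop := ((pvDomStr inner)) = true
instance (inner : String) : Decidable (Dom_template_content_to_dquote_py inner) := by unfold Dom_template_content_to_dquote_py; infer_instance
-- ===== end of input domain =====

-- B replaces A's index-driven while-loop scanner by one split on '\', a per-char map of each
-- segment, and a rejoin that decides each boundary escape locally (objective: alternative).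

-- ===== PORT A =====
-- A's while-loop: at each index, branch on backslash-escape (only when a next char exists),
-- then '"', then newline, else copy; ported as the structural recursion over the char list.
def pvGoA : List Char → List Char
  | [] => []
  | [c] =>
      -- last char: the 'c == \\ and i+1 < n' test fails, so only the later branches apply
      if c = '"' then ['\\', '"']
      else if c = '\n' then ['\\', 'n']
      else [c]
  | c :: next :: rest =>
      if c = '\\' then
        if next = '`' then '`' :: pvGoA rest
        else c :: next :: pvGoA rest
      else if c = '"' then '\\' :: '"' :: pvGoA (next :: rest)
      else if c = '\n' then '\\' :: 'n' :: pvGoA (next :: rest)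
      else c :: pvGoA (next :: rest)

def template_content_to_dquote_py (inner : String) : String :=
  String.ofList (pvGoA inner.toList)

-- ===== PORT B =====
-- plain(s): the per-char generator ''.join('\\"' if c == '"' else '\\n' if c == '\n' else c for c in s)
def pvPlainB (s : List Char) : List Char :=
  s.flatMap (fun c => if c = '"' then ['\\', '"'] else if c = '\n' then ['\\', 'n'] else [c])

-- the while-loop over segs[1:]: each segment is preceded by one '\' of the original
def pvRestB : List (List Char) → List Char
  | [] => []
  | (c :: tail) :: rest =>
      (if c = '`' then ['`'] else ['\\', c]) ++ pvPlainB tail ++ pvRestB rest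
  | [] :: r :: rest => ['\\', '\\'] ++ pvPlainB r ++ pvRestB rest
  | [[]] => ['\\']

def template_content_to_dquote_py_alt (inner : String) : String :=
  match List.splitOn '\\' inner.toList with
  | [] => ""  -- unreachable: split never returns an empty list
  | s0 :: rest => String.ofList (pvPlainB s0 ++ pvRestB rest)

-- ===== PRECONDITION & SPEC =====
def Spec_template_content_to_dquote_py (inner : String) (out : String) : Prop := out = template_content_to_dquote_py_alt inner
instance (inner : String) (out : String) : Decidable (Spec_template_content_to_dquote_py inner out) := by unfold Spec_template_content_to_dquote_py; infer_instance

-- ===== CLAIM (what is proved, stated in full; the proofs are below) =====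
def Claim_equal_template_content_to_dquote_py : Prop := ∀ (inner : String), Dom_template_content_to_dquote_py inner → Spec_template_content_to_dquote_py inner (template_content_to_dquote_py inner)

-- ===== LEMMAS AND PROOFS =====
-- the scanner equals "map the head segment, then rejoin the rest", for any split result
theorem pvKey : ∀ (l : List Char) (s0 : List Char) (rest : List (List Char)),
    List.splitOnP (· == '\\') l = s0 :: rest → pvGoA l = pvPlainB s0 ++ pvRestB rest := by
  intro l
  induction l using pvGoA.induct with
  | case1 =>
      intro s0 r h
      simp [List.splitOnP_nil] at h
      obtain ⟨rfl, rfl⟩ := h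
      simp [pvGoA, pvPlainB, pvRestB]
  | case2 =>
      intro s0 r h
      simp [List.splitOnP_cons, List.splitOnP_nil] at h
      obtain ⟨rfl, rfl⟩ := h
      simp [pvGoA, pvPlainB, pvRestB]
  | case3 _ =>
      intro s0 r h
      simp [List.splitOnP_cons, List.splitOnP_nil] at h
      obtain ⟨rfl, rfl⟩ := h
      simp [pvGoA, pvPlainB, pvRestB]
  | case4 c h1 h2 =>
      intro s0 r h
      by_cases hc : c = '\\'
      · subst hc
        simp [List.splitOnP_cons, List.splitOnP_nil] at h
        obtain ⟨rfl, rfl⟩ := h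
        simp [pvGoA, pvPlainB, pvRestB, h1, h2]
      · simp [List.splitOnP_cons, List.splitOnP_nil, hc] at h
        obtain ⟨rfl, rfl⟩ := h
        simp [pvGoA, pvPlainB, pvRestB, h1, h2]
  | case5 rest ih =>
      intro s0 r h
      cases h' : List.splitOnP (· == '\\') rest with
      | nil => exact absurd h' (List.splitOnP_ne_nil _ _)
      | cons t0 tr =>
        simp [List.splitOnP_cons, h'] at h
        obtain ⟨rfl, rfl⟩ := h
        simp [pvGoA, pvPlainB, pvRestB, ih t0 tr h']
  | case6 next rest hne ih =>
      intro s0 r h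
      by_cases hn : next = '\\'
      · subst hn
        cases h' : List.splitOnP (· == '\\') rest with
        | nil => exact absurd h' (List.splitOnP_ne_nil _ _)
        | cons t0 tr =>
          simp [List.splitOnP_cons, h'] at h
          obtain ⟨rfl, rfl⟩ := h
          simp [pvGoA, pvPlainB, pvRestB, hne, ih t0 tr h']
      · cases h' : List.splitOnP (· == '\\') rest with
        | nil => exact absurd h' (List.splitOnP_ne_nil _ _)
        | cons t0 tr =>
          simp [List.splitOnP_cons, h', hn] at h
          obtain ⟨rfl, rfl⟩ := h
          simp [pvGoA, pvPlainB, pvRestB, hne, ih t0 tr h']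
  | case7 next rest _ ih =>
      intro s0 r h
      cases h' : List.splitOnP (· == '\\') (next :: rest) with
      | nil => exact absurd h' (List.splitOnP_ne_nil _ _)
      | cons t0 tr =>
        rw [List.splitOnP_cons] at h
        simp [h'] at h
        obtain ⟨rfl, rfl⟩ := h
        simp [pvGoA, pvPlainB, ih t0 tr h']
  | case8 next rest _ _ ih =>
      intro s0 r h
      cases h' : List.splitOnP (· == '\\') (next :: rest) with
      | nil => exact absurd h' (List.splitOnP_ne_nil _ _)
      | cons t0 tr =>
        rw [List.splitOnP_cons] at h
        simp [h'] at h
        obtain ⟨rfl, rfl⟩ := h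
        simp [pvGoA, pvPlainB, ih t0 tr h']
  | case9 c next rest hc h1 h2 ih =>
      intro s0 r h
      cases h' : List.splitOnP (· == '\\') (next :: rest) with
      | nil => exact absurd h' (List.splitOnP_ne_nil _ _)
      | cons t0 tr =>
        rw [List.splitOnP_cons] at h
        simp [h', hc] at h
        obtain ⟨rfl, rfl⟩ := h
        simp [pvGoA, pvPlainB, h1, h2, hc, ih t0 tr h']

-- ===== VERDICT (by name: the statement is the Claim_ definition above) =====
theorem template_content_to_dquote_py_spec : Claim_equal_template_content_to_dquote_py := by
  intro inner _
  unfold Spec_template_content_to_dquote_py template_content_to_dquote_py template_content_to_dquote_py_alt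
  cases h : List.splitOn '\\' inner.toList with
  | nil => exact absurd h (List.splitOnP_ne_nil _ _)
  | cons s0 rest =>
    rw [pvKey inner.toList s0 rest h]
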